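-- pv_equiv track=rewrite | github.com/juvelop17/problem_solving | Codeforces/#E109_DIV2/B.py | solution
-- ===== SOURCE A (Python) =====
-- def solution(n, nums):
--     start = 0
--     end = len(nums)-1
--
--     while start < len(nums):
--         if nums[start] != start + 1:
--             break
--         start += 1
--
--     while end >= 0:
--         if nums[end] != end + 1:
--             break
--         end -= 1
--
--     if nums[0] == len(nums) and nums[-1] == 1:
--         return 3
--     elif start == 0 and end == len(nums) - 1:
--         return 2
--     elif start < end:
--         return 1
--     elif start > end:
--         return 0
--     return -1
-- ===== SOURCE B (Python) =====
-- def solution(n, nums):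
--     size = len(nums)
--     if nums[0] == size and nums[-1] == 1:
--         return 3
--     if nums[0] != 1 and nums[-1] != size:
--         return 2
--     m = sum(1 for i, v in enumerate(nums) if v != i + 1)
--     if m >= 2:
--         return 1
--     if m == 0:
--         return 0
--     return -1
-- ===== Notes on version B (the rewrite author's own statement) =====
-- stated objective: alternative
-- what changed: B never computes the first/last mismatch positions at all: it decides the endpoint-based branches (3 and 2) directly from nums[0] and nums[-1] before any scan, and then distinguishes the remaining branches solely by the COUNT of mismatches (0 / 1 / >=2), replacing A's two opposite-direction positional scans and index comparisons by a counting argument.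
-- outside the precondition, e.g. on solution(0, []): A raises IndexError, B raises IndexError
import Mathlib
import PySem

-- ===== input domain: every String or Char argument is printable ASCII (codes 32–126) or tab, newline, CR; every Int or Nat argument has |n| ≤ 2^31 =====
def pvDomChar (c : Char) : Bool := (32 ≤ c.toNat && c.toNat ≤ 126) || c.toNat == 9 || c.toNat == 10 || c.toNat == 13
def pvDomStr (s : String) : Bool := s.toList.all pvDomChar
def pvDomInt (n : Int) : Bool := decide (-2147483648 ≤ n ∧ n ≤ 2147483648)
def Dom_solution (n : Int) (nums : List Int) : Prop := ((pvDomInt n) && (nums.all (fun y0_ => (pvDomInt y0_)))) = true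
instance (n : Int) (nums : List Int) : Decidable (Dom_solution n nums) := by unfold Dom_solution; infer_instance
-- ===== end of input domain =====

-- B drops A's positional first/last-mismatch scans: it decides branches 3 and 2 from the two
-- endpoint values alone and the remaining branches from the mismatch COUNT (objective: alternative).

-- ===== PORT A =====
-- first while loop: advance start while nums[start] == start+1
-- (pyGetD is exact here: the guard s < len and s ≥ 0 keep the index in range)
def solLoopStart (nums : List Int) (s : Int) : Int :=
  if h : s < (nums.length : Int) then
    if PySem.List.pyGetD nums s 0 ≠ s + 1 then s
    else solLoopStart nums (s + 1)
  else s
  termination_by ((nums.length : Int) - s).toNat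
  decreasing_by omega

-- second while loop: retreat end while nums[end] == end+1
def solLoopEnd (nums : List Int) (e : Int) : Int :=
  if h : e ≥ 0 then
    if PySem.List.pyGetD nums e 0 ≠ e + 1 then e
    else solLoopEnd nums (e - 1)
  else e
  termination_by (e + 1).toNat
  decreasing_by omega

def solution (n : Int) (nums : List Int) : Int :=
  let start := solLoopStart nums 0
  let e := solLoopEnd nums ((nums.length : Int) - 1)
  if PySem.List.pyGetD nums 0 0 = (nums.length : Int) ∧ PySem.List.pyGetD nums (-1) 0 = 1 then 3
  else if start = 0 ∧ e = (nums.length : Int) - 1 then 2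
  else if start < e then 1
  else if start > e then 0
  else -1

-- ===== PORT B =====
def solution_alt (n : Int) (nums : List Int) : Int :=
  let size := (nums.length : Int)
  if PySem.List.pyGetD nums 0 0 = size ∧ PySem.List.pyGetD nums (-1) 0 = 1 then 3
  else if PySem.List.pyGetD nums 0 0 ≠ 1 ∧ PySem.List.pyGetD nums (-1) 0 ≠ size then 2
  else
    let m := ((PySem.List.enumerate nums 0).filter (fun p => p.2 ≠ p.1 + 1)).length
    if m ≥ 2 then 1
    else if m = 0 then 0
    else -1

-- ===== PRECONDITION & SPEC =====
-- Pre_ excludes only the empty list, on which A (and B) raise IndexError at nums[0].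
def Pre_solution (n : Int) (nums : List Int) : Prop := nums ≠ []
instance (n : Int) (nums : List Int) : Decidable (Pre_solution n nums) := by unfold Pre_solution; infer_instance
def pvWitness_solution : Int × List Int := (3, [1, 3, 2])

def Spec_solution (n : Int) (nums : List Int) (out : Int) : Prop := out = solution_alt n nums
instance (n : Int) (nums : List Int) (out : Int) : Decidable (Spec_solution n nums out) := by unfold Spec_solution; infer_instance

-- ===== CLAIM (what is proved, stated in full; the proofs are below) =====
def Claim_equal_solution : Prop := ∀ (n : Int) (nums : List Int), Dom_solution n nums → Pre_solution n nums → Spec_solution n nums (solution n nums)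

-- ===== LEMMAS AND PROOFS =====

-- the list of mismatch indices of nums, offsets starting at s
def pvMis (xs : List Int) (s : Int) : List Int :=
  ((PySem.List.enumerate xs s).filter (fun p => p.2 ≠ p.1 + 1)).map (fun p => p.1)

theorem pvMis_nil (s : Int) : pvMis [] s = [] := by simp [pvMis, PySem.List.enumerate_nil]

theorem pvMis_cons (x : Int) (xs : List Int) (s : Int) :
    pvMis (x :: xs) s = (if x ≠ s + 1 then [s] else []) ++ pvMis xs (s + 1) := by
  simp [pvMis, PySem.List.enumerate_cons, List.filter_cons]
  split_ifs with h <;> simp_all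

theorem pvMis_append (xs ys : List Int) (s : Int) :
    pvMis (xs ++ ys) s = pvMis xs s ++ pvMis ys (s + xs.length) := by
  simp [pvMis, PySem.List.enumerate_append, List.filter_append]

theorem pvMis_bounds (xs : List Int) (s : Int) :
    ∀ i ∈ pvMis xs s, s ≤ i ∧ i < s + xs.length := by
  induction xs generalizing s with
  | nil => simp [pvMis_nil]
  | cons x xs ih =>
    intro i hi
    rw [pvMis_cons] at hi
    simp only [List.length_cons]
    rcases List.mem_append.1 hi with h | h
    · have : i = s := by split_ifs at h <;> simp_all
      subst this
      constructor
      · omega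
      · push_cast; omega
    · have := ih (s + 1) i h
      push_cast
      omega

theorem pvMis_pairwise (xs : List Int) (s : Int) :
    (pvMis xs s).Pairwise (· < ·) := by
  induction xs generalizing s with
  | nil => simp [pvMis_nil]
  | cons x xs ih =>
    rw [pvMis_cons, List.pairwise_append]
    refine ⟨by split_ifs <;> simp, ih (s + 1), ?_⟩
    intro a ha b hb
    have hb' := (pvMis_bounds xs (s + 1) b hb).1
    have ha' : a = s := by split_ifs at ha <;> simp_all
    omega

theorem head_mis_iff (nums : List Int) (h : nums ≠ []) :
    ((pvMis nums 0).head?.getD (nums.length : Int) = 0 ↔ PySem.List.pyGetD nums 0 0 ≠ 1) := by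
  obtain ⟨x, xs, rfl⟩ := List.exists_cons_of_ne_nil h
  rw [pvMis_cons, PySem.List.pyGetD_zero_cons, Int.zero_add]
  by_cases hx : x = (1 : Int)
  · simp only [hx, ne_eq, not_true_eq_false, if_false, List.nil_append]
    constructor
    · intro hhead
      exfalso
      cases hL : pvMis xs 1 with
      | nil =>
        rw [hL] at hhead
        simp at hhead
        omega
      | cons a t =>
        have ha := (pvMis_bounds xs 1 a (by rw [hL]; simp)).1
        rw [hL] at hhead; simp at hhead
        omega
    · intro hx1; exact hx1.elim
  · rw [if_pos (by simpa using hx)]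
    simp [hx]

theorem last_mis_iff (nums : List Int) (h : nums ≠ []) :
    ((pvMis nums 0).getLast?.getD (-1) = (nums.length : Int) - 1 ↔
      PySem.List.pyGetD nums (-1) 0 ≠ (nums.length : Int)) := by
  rcases List.eq_nil_or_concat nums with rfl | ⟨ys, z, rfl⟩
  · exact absurd rfl h
  · rw [List.concat_eq_append, pvMis_append, PySem.List.pyGetD_neg_one_append_singleton,
        pvMis_cons, pvMis_nil]
    have hlen : (((ys ++ [z]).length : Int)) = (ys.length : Int) + 1 := by simp
    rw [hlen]
    rw [Int.zero_add]
    by_cases hz : z = (ys.length : Int) + 1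
    · simp only [hz, ne_eq, not_true_eq_false, if_false, List.append_nil]
      constructor
      · intro hlast
        exfalso
        cases hL : (pvMis ys 0).getLast? with
        | none => rw [hL] at hlast; simp at hlast
        | some a =>
          have ha := (pvMis_bounds ys 0 a (List.mem_of_getLast? hL)).2
          rw [hL] at hlast; simp at hlast
          omega
      · intro hzz; exact hzz.elim
    · rw [if_pos (by simpa using hz)]
      constructor
      · intro _; simpa using hz
      · intro _; simp [List.getLast?_append]

theorem loopStart_eq (nums : List Int) (s : Nat) (hs : s ≤ nums.length) :
    solLoopStart nums (s : Int) = (pvMis (nums.drop s) (s : Int)).head?.getD (nums.length : Int) := by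
  induction hmeasure : nums.length - s generalizing s with
  | zero =>
    have hs' : s = nums.length := by omega
    rw [solLoopStart]
    simp [hs', pvMis_nil]
  | succ k ih =>
    have hlt : s < nums.length := by omega
    have hdrop : nums.drop s = nums[s] :: nums.drop (s + 1) :=
      List.drop_eq_getElem_cons hlt
    rw [solLoopStart]
    rw [dif_pos (by exact_mod_cast hlt)]
    rw [hdrop, pvMis_cons]
    have hget : PySem.List.pyGetD nums (s : Int) 0 = nums[s] := by
      rw [PySem.List.pyGetD_natCast]; exact List.getD_eq_getElem _ _ hlt
    by_cases hx : nums[s] ≠ (s : Int) + 1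
    · rw [if_pos (by rw [hget]; exact hx), if_pos hx]
      simp
    · rw [if_neg (by rw [hget]; exact hx), if_neg hx]
      have : ((s : Int) + 1) = ((s + 1 : Nat) : Int) := by push_cast; ring
      rw [this, ih (s + 1) (by omega) (by omega)]
      simp

theorem loopEnd_eq (nums : List Int) (e : Int) (he : -1 ≤ e) (he' : e < nums.length) :
    solLoopEnd nums e = (pvMis (nums.take (e + 1).toNat) 0).getLast?.getD (-1) := by
  induction hmeasure : (e + 1).toNat generalizing e with
  | zero =>
    have : e = -1 := by omega
    rw [solLoopEnd]
    simp [this, pvMis_nil]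
  | succ k ih =>
    have h0 : 0 ≤ e := by omega
    have hk : (e + 1).toNat = e.toNat + 1 := by omega
    have hlt : e.toNat < nums.length := by omega
    have htake : nums.take (e + 1).toNat = nums.take e.toNat ++ [nums[e.toNat]] := by
      rw [hk]; exact List.take_succ_eq_append_getElem hlt
    have hlen : ((nums.take e.toNat).length : Int) = e := by
      simp [List.length_take]; omega
    rw [solLoopEnd, dif_pos h0, show k + 1 = (e + 1).toNat from hmeasure.symm,
        htake, pvMis_append, pvMis_cons, pvMis_nil]
    rw [hlen]
    have hget : PySem.List.pyGetD nums e 0 = nums[e.toNat] :=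
      PySem.List.pyGetD_eq_getElem nums 0 h0 he'
    by_cases hx : nums[e.toNat] ≠ e + 1
    · rw [if_pos (by rw [hget]; exact hx), if_pos (by simpa using hx)]
      simp [List.getLast?_append]
    · rw [if_neg (by rw [hget]; exact hx), if_neg (by simpa using hx)]
      have hke : k = e.toNat := by omega
      subst hke
      rw [ih (e - 1) (by omega) (by omega) (by omega)]
      simp

theorem pvMis_length (nums : List Int) :
    ((PySem.List.enumerate nums 0).filter (fun p => p.2 ≠ p.1 + 1)).length = (pvMis nums 0).length := by
  simp [pvMis]

-- ===== VERDICT (by name: the statement is the Claim_ definition above) =====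
theorem solution_spec : Claim_equal_solution := by
  intro n nums _ hpre
  unfold Spec_solution solution solution_alt
  have hlen0 : nums.length ≠ 0 := by simpa [List.length_eq_zero_iff] using hpre
  have h1 : solLoopStart nums 0 = (pvMis nums 0).head?.getD (nums.length : Int) := by
    have := loopStart_eq nums 0 (by omega)
    simpa using this
  have h2 : solLoopEnd nums ((nums.length : Int) - 1) =
      (pvMis nums 0).getLast?.getD (-1) := by
    have := loopEnd_eq nums ((nums.length : Int) - 1) (by omega) (by omega)
    rw [this]
    congr 2
    have : ((nums.length : Int) - 1 + 1).toNat = nums.length := by omega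
    rw [this, List.take_length]
  rw [h1, h2, pvMis_length]
  have hs0 := head_mis_iff nums hpre
  have he := last_mis_iff nums hpre
  by_cases hc3 : PySem.List.pyGetD nums 0 0 = (nums.length : Int) ∧ PySem.List.pyGetD nums (-1) 0 = 1
  · simp only [if_pos hc3]
  · simp only [if_neg hc3]
    -- the branch-2 conditions of A and B are equivalent
    have hb2 : ((pvMis nums 0).head?.getD (nums.length : Int) = 0 ∧
        (pvMis nums 0).getLast?.getD (-1) = (nums.length : Int) - 1) ↔
        (PySem.List.pyGetD nums 0 0 ≠ 1 ∧ PySem.List.pyGetD nums (-1) 0 ≠ (nums.length : Int)) := by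
      constructor
      · rintro ⟨ha, hb⟩; exact ⟨hs0.1 ha, he.1 hb⟩
      · rintro ⟨ha, hb⟩; exact ⟨hs0.2 ha, he.2 hb⟩
    by_cases hc2 : PySem.List.pyGetD nums 0 0 ≠ 1 ∧ PySem.List.pyGetD nums (-1) 0 ≠ (nums.length : Int)
    · rw [if_pos (hb2.2 hc2), if_pos hc2]
    · rw [if_neg (fun hh => hc2 (hb2.1 hh)), if_neg hc2]
      -- remaining branches: decided by the shape of the mismatch list
      rcases hL : pvMis nums 0 with _ | ⟨a, t⟩
      · simp only [List.head?_nil, List.getLast?_nil, Option.getD_none, List.length_nil]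
        rw [if_neg (show ¬((nums.length : Int) < -1) by omega),
            if_pos (show ((nums.length : Int) > -1) by omega)]
        norm_num
      · rcases t with _ | ⟨b, t⟩
        · simp only [List.head?_cons, List.getLast?_singleton, Option.getD_some,
            List.length_cons, List.length_nil]
          rw [if_neg (show ¬(a < a) by omega), if_neg (show ¬(a > a) by omega)]
          norm_num
        · have hpw := pvMis_pairwise nums 0
          rw [hL] at hpw
          have hne : (b :: t : List Int) ≠ [] := by simp
          have hlast_mem : (a :: b :: t).getLast (by simp) ∈ b :: t := by
            rw [List.getLast_cons hne]
            exact List.getLast_mem hne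
          have halt : a < (a :: b :: t).getLast (by simp) := by
            rcases List.pairwise_cons.1 hpw with ⟨hall, _⟩
            exact hall _ hlast_mem
          have hgl : (a :: b :: t).getLast? = some ((a :: b :: t).getLast (by simp)) :=
            List.getLast?_eq_some_getLast _
          rw [hgl]
          simp only [List.head?_cons, Option.getD_some, List.length_cons]
          rw [if_pos halt, if_pos (show t.length + 1 + 1 ≥ 2 by omega)]
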